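-- pv_equiv track=rewrite | github.com/Vaibhav-Dharmik/appointment-scheduling-agent | backend/agent/scheduling_agent.py | _generate_mock_response
-- ===== SOURCE A (Python) =====
-- def _generate_mock_response(messages: list) -> str:
--     """Generate intelligent mock responses based on conversation context."""
--     if not messages:
--         return "Hello! How can I assist you with scheduling an appointment?"
--
--     # Get the FIRST substantive user message (skip system prompts and instructions)
--     last_user_msg = None
--     for msg in messages:
--         if isinstance(msg, dict):
--             if msg.get("role") == "user":
--                 content = msg.get("content", "").lower()
--                 # Skip instructions like "please respond naturally"
--                 if not content.startswith("please "):
--                     last_user_msg = content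
--                     break
--
--     if not last_user_msg:
--         return "I'm here to help. What would you like to do?"
--
--     # Intelligent fallback responses based on detected patterns
--     if any(k in last_user_msg for k in ["hours", "open", "close", "when", "location", "address"]):
--         return "Our clinic is open Monday-Friday, 9 AM - 5 PM, and Saturday 10 AM - 2 PM. We're located at 123 Healthcare Ave. Is there anything else I can help you with?"
--
--     if any(k in last_user_msg for k in ["insurance", "billing", "payment", "cost", "price", "fee"]):
--         return "We accept most major insurance plans. You're welcome to contact our billing department at (555) 123-4567 for specific coverage questions. Would you like to schedule an appointment?"
--
--     if any(k in last_user_msg for k in ["book", "schedule", "appointment", "date", "time", "reschedule"]):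
--         return "I can help you schedule an appointment! Please let me know:\n1) Type of appointment (general consultation, follow-up, physical exam, specialist consultation)\n2) Your preferred date (YYYY-MM-DD)\n3) Time preference (morning or afternoon)\n\nWhich appointment type interests you?"
--
--     if any(k in last_user_msg for k in ["cancel", "reschedule", "change", "modify"]):
--         return "I can help you modify your appointment. Please provide your confirmation code or appointment ID so I can look it up. Then let me know what changes you'd like to make."
--
--     if any(k in last_user_msg for k in ["doctor", "physician", "specialist", "staff", "qualifications"]):
--         return "Our team consists of experienced healthcare professionals. For detailed information about specific doctors and their specialties, please visit our website or call our main office."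
--
--     # Default friendly response
--     return "Thank you for reaching out! I'm here to help with appointment scheduling, answer clinic questions, and provide support. What can I assist you with today?"
-- ===== SOURCE B (Python) =====
-- _GROUPS = [
--     (("hours", "open", "close", "when", "location", "address"),
--      "Our clinic is open Monday-Friday, 9 AM - 5 PM, and Saturday 10 AM - 2 PM. We're located at 123 Healthcare Ave. Is there anything else I can help you with?"),
--     (("insurance", "billing", "payment", "cost", "price", "fee"),
--      "We accept most major insurance plans. You're welcome to contact our billing department at (555) 123-4567 for specific coverage questions. Would you like to schedule an appointment?"),
--     (("book", "schedule", "appointment", "date", "time", "reschedule"),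
--      "I can help you schedule an appointment! Please let me know:\n1) Type of appointment (general consultation, follow-up, physical exam, specialist consultation)\n2) Your preferred date (YYYY-MM-DD)\n3) Time preference (morning or afternoon)\n\nWhich appointment type interests you?"),
--     (("cancel", "reschedule", "change", "modify"),
--      "I can help you modify your appointment. Please provide your confirmation code or appointment ID so I can look it up. Then let me know what changes you'd like to make."),
--     (("doctor", "physician", "specialist", "staff", "qualifications"),
--      "Our team consists of experienced healthcare professionals. For detailed information about specific doctors and their specialties, please visit our website or call our main office."),
-- ]
--
-- # keyword -> index of the FIRST group containing it (so "reschedule" keeps priority 2,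
-- # exactly reproducing the branch order of the original if-chain)
-- _PRIORITY = {}
-- for _i, (_kws, _resp) in enumerate(_GROUPS):
--     for _k in _kws:
--         _PRIORITY.setdefault(_k, _i)
--
--
-- def _generate_mock_response(messages: list) -> str:
--     if not messages:
--         return "Hello! How can I assist you with scheduling an appointment?"
--
--     msg = next(
--         (m.get("content", "").lower()
--          for m in messages
--          if isinstance(m, dict)
--          and m.get("role") == "user"
--          and not m.get("content", "").lower().startswith("please ")),
--         None,
--     )
--
--     if not msg:
--         return "I'm here to help. What would you like to do?"
--
--     best = min((p for k, p in _PRIORITY.items() if k in msg), default=None)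
--     if best is None:
--         return "Thank you for reaching out! I'm here to help with appointment scheduling, answer clinic questions, and provide support. What can I assist you with today?"
--     return _GROUPS[best][1]
-- ===== Notes on version B (the rewrite author's own statement) =====
-- stated objective: alternative
-- what changed: A's six sequential if/any branch checks are replaced by a keyword->first-group-priority dict built once from the group table (setdefault keeps 'reschedule' at its earlier priority) and a single min() over the priorities of the keywords present in the message; phase 1 becomes a declarative next()-over-generator lookup.
import Mathlib
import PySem

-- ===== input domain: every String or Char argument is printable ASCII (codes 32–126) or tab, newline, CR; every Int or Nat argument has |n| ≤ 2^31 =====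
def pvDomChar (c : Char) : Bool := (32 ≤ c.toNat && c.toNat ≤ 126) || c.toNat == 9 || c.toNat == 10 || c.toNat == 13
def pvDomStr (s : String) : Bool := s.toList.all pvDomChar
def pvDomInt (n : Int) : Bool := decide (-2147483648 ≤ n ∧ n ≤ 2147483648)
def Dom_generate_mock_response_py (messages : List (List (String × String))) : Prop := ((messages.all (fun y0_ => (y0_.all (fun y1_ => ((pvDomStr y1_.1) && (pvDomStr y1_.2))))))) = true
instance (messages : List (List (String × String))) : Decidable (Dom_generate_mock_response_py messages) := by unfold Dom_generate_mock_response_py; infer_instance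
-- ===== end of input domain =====

-- B replaces A's sequential per-group if-chain by a keyword→first-group-priority dict built once
-- and a single min-priority selection over the keywords present in the message (objective: alternative).

-- ===== PORT A =====
-- the canned response strings (shared literals of both ports)
def pvHello : String := "Hello! How can I assist you with scheduling an appointment?"
def pvHelp : String := "I'm here to help. What would you like to do?"
def pvHours : String := "Our clinic is open Monday-Friday, 9 AM - 5 PM, and Saturday 10 AM - 2 PM. We're located at 123 Healthcare Ave. Is there anything else I can help you with?"
def pvIns : String := "We accept most major insurance plans. You're welcome to contact our billing department at (555) 123-4567 for specific coverage questions. Would you like to schedule an appointment?"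
def pvBook : String := "I can help you schedule an appointment! Please let me know:\n1) Type of appointment (general consultation, follow-up, physical exam, specialist consultation)\n2) Your preferred date (YYYY-MM-DD)\n3) Time preference (morning or afternoon)\n\nWhich appointment type interests you?"
def pvCancel : String := "I can help you modify your appointment. Please provide your confirmation code or appointment ID so I can look it up. Then let me know what changes you'd like to make."
def pvDoctor : String := "Our team consists of experienced healthcare professionals. For detailed information about specific doctors and their specialties, please visit our website or call our main office."
def pvDefault : String := "Thank you for reaching out! I'm here to help with appointment scheduling, answer clinic questions, and provide support. What can I assist you with today?"

-- A's for-loop with break: first user message whose lowercased content does not start with "please "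
def pvALoop : List (List (String × String)) → Option String
  | [] => none
  | m :: rest =>
      if (PySem.Dict.get? (PySem.Dict.mk m) "role") == some "user" then
        let content := PySem.Str.lower (PySem.Dict.getD (PySem.Dict.mk m) "content" "")
        if PySem.Str.startswith content "please " then pvALoop rest
        else some content
      else pvALoop rest

def generate_mock_response_py (messages : List (List (String × String))) : String :=
  if messages = [] then pvHello
  else
    match pvALoop messages with
    | none => pvHelp
    | some msg =>
      if msg = "" then pvHelp  -- Python's `if not last_user_msg` is also true for the empty string
      else if ["hours", "open", "close", "when", "location", "address"].any (fun k => PySem.Str.isIn k msg) then pvHours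
      else if ["insurance", "billing", "payment", "cost", "price", "fee"].any (fun k => PySem.Str.isIn k msg) then pvIns
      else if ["book", "schedule", "appointment", "date", "time", "reschedule"].any (fun k => PySem.Str.isIn k msg) then pvBook
      else if ["cancel", "reschedule", "change", "modify"].any (fun k => PySem.Str.isIn k msg) then pvCancel
      else if ["doctor", "physician", "specialist", "staff", "qualifications"].any (fun k => PySem.Str.isIn k msg) then pvDoctor
      else pvDefault

-- ===== PORT B =====
def pvGroups : List (List String × String) :=
  [ (["hours", "open", "close", "when", "location", "address"], pvHours)
  , (["insurance", "billing", "payment", "cost", "price", "fee"], pvIns)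
  , (["book", "schedule", "appointment", "date", "time", "reschedule"], pvBook)
  , (["cancel", "reschedule", "change", "modify"], pvCancel)
  , (["doctor", "physician", "specialist", "staff", "qualifications"], pvDoctor)
  ]

-- _PRIORITY: keyword -> index of the FIRST group containing it (setdefault keeps the first)
def pvPriority : PySem.Dict String Int :=
  (PySem.List.enumerate pvGroups 0).foldl
    (fun d p => p.2.1.foldl (fun d k => d.setdefault k p.1) d) PySem.Dict.empty

-- B's next(generator, None): first matching dict, then extract the lowered content
def pvBFind (messages : List (List (String × String))) : Option String :=
  (messages.find? (fun m =>
      ((PySem.Dict.get? (PySem.Dict.mk m) "role") == some "user")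
      && !(PySem.Str.startswith (PySem.Str.lower (PySem.Dict.getD (PySem.Dict.mk m) "content" "")) "please "))).map
    (fun m => PySem.Str.lower (PySem.Dict.getD (PySem.Dict.mk m) "content" ""))

def generate_mock_response_py_alt (messages : List (List (String × String))) : String :=
  if messages = [] then pvHello
  else
    match pvBFind messages with
    | none => pvHelp
    | some msg =>
      if msg = "" then pvHelp
      else
        match PySem.List.min?
            ((pvPriority.items.filter (fun p => PySem.Str.isIn p.1 msg)).map (fun p => p.2))
            (fun x => x) with
        | none => pvDefault
        | some best =>
          -- _GROUPS[best][1]; best is always a valid index (0..4), so the IndexError branch is unreachable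
          match PySem.List.pyGet? pvGroups best with
          | some g => g.2
          | none => pvDefault

-- ===== PRECONDITION & SPEC =====
def Spec_generate_mock_response_py (messages : List (List (String × String))) (out : String) : Prop := out = generate_mock_response_py_alt messages
instance (messages : List (List (String × String))) (out : String) : Decidable (Spec_generate_mock_response_py messages out) := by unfold Spec_generate_mock_response_py; infer_instance

-- ===== CLAIM (what is proved, stated in full; the proofs are below) =====
def Claim_equal_generate_mock_response_py : Prop := ∀ (messages : List (List (String × String))), Dom_generate_mock_response_py messages → Spec_generate_mock_response_py messages (generate_mock_response_py messages)

-- ===== LEMMAS AND PROOFS =====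
-- phase 1: the two lookups agree
theorem pvALoop_eq_pvBFind (messages : List (List (String × String))) :
    pvALoop messages = pvBFind messages := by
  induction messages with
  | nil => rfl
  | cons m rest ih =>
      simp only [pvALoop, pvBFind, List.find?_cons] at *
      cases hr : ((PySem.Dict.get? (PySem.Dict.mk m) "role") == some "user") <;>
      cases hp : PySem.Str.startswith (PySem.Str.lower (PySem.Dict.getD (PySem.Dict.mk m) "content" "")) "please " <;>
      simp only [Bool.not_true, Bool.not_false, Bool.true_and, Bool.false_and,
        Bool.false_eq_true, reduceIte, ih, Option.map]

-- the priority dict, evaluated: keyword paired with the index of its first group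
def pvLit : List (String × Int) :=
  [ ("hours", 0), ("open", 0), ("close", 0), ("when", 0), ("location", 0), ("address", 0)
  , ("insurance", 1), ("billing", 1), ("payment", 1), ("cost", 1), ("price", 1), ("fee", 1)
  , ("book", 2), ("schedule", 2), ("appointment", 2), ("date", 2), ("time", 2), ("reschedule", 2)
  , ("cancel", 3), ("change", 3), ("modify", 3)
  , ("doctor", 4), ("physician", 4), ("specialist", 4), ("staff", 4), ("qualifications", 4) ]

theorem pvItems_eq : pvPriority.items = pvLit := by decide

-- min(l) = i when i occurs in l and bounds l from below
theorem pv_min?_eq (l : List Int) (i : Int) (h1 : i ∈ l) (h2 : ∀ x ∈ l, i ≤ x) :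
    PySem.List.min? l (fun x => x) = some i := by
  cases hm : PySem.List.min? l (fun x => x) with
  | none =>
      rw [PySem.List.min?_eq_none_iff] at hm
      subst hm; simp at h1
  | some m =>
      have hmem := PySem.List.min?_mem hm
      have hle : m ≤ i := PySem.List.min?_isMin hm i h1
      have hge : i ≤ m := h2 m hmem
      rw [le_antisymm hle hge]

-- lower bound for the filtered priorities, from the absent earlier keywords
theorem pv_lower (msg : String) (i : Int) (prev : List String)
    (hcov : ∀ p ∈ pvLit, p.2 < i → p.1 ∈ prev)
    (hprev : ∀ k ∈ prev, PySem.Str.isIn k msg = false) :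
    ∀ x ∈ (pvLit.filter (fun p => PySem.Str.isIn p.1 msg)).map (fun p => p.2), i ≤ x := by
  intro x hx
  simp only [List.mem_map, List.mem_filter] at hx
  obtain ⟨p, ⟨hpL, hpf⟩, rfl⟩ := hx
  rcases lt_or_ge p.2 i with hlt | hge
  · rw [hprev p.1 (hcov p hpL hlt)] at hpf
    exact absurd hpf Bool.false_ne_true
  · exact hge

-- a matching keyword of group i puts i into the filtered priorities
theorem pv_mem_prios (msg : String) (i : Int) (k : String)
    (hkL : (k, i) ∈ pvLit) (hkin : PySem.Str.isIn k msg = true) :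
    i ∈ (pvLit.filter (fun p => PySem.Str.isIn p.1 msg)).map (fun p => p.2) :=
  List.mem_map.mpr ⟨(k, i), List.mem_filter.mpr ⟨hkL, hkin⟩, rfl⟩

theorem pv_not_true {b : Bool} (h : b = false) : ¬ b = true := by simp [h]

theorem pv_append_false {f : String → Bool} {l1 l2 : List String}
    (h1 : ∀ k ∈ l1, f k = false) (h2 : ∀ k ∈ l2, f k = false) :
    ∀ k ∈ l1 ++ l2, f k = false := fun k hk => (List.mem_append.mp hk).elim (h1 k) (h2 k)

-- ===== VERDICT (by name: the statement is the Claim_ definition above) =====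
theorem generate_mock_response_py_spec : Claim_equal_generate_mock_response_py := by
  intro messages _
  unfold Spec_generate_mock_response_py generate_mock_response_py generate_mock_response_py_alt
  rw [pvALoop_eq_pvBFind]
  by_cases hnil : messages = []
  · simp [hnil]
  · simp only [hnil, if_false]
    cases hfind : pvBFind messages with
    | none => rfl
    | some msg =>
        by_cases hm : msg = ""
        · simp [hm]
        · simp only [hm, if_false, pvItems_eq]
          have g0 : ∀ k ∈ ["hours", "open", "close", "when", "location", "address"],
              (k, (0 : Int)) ∈ pvLit := by decide
          have g1 : ∀ k ∈ ["insurance", "billing", "payment", "cost", "price", "fee"],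
              (k, (1 : Int)) ∈ pvLit := by decide
          have g2 : ∀ k ∈ ["book", "schedule", "appointment", "date", "time", "reschedule"],
              (k, (2 : Int)) ∈ pvLit := by decide
          have g4 : ∀ k ∈ ["doctor", "physician", "specialist", "staff", "qualifications"],
              (k, (4 : Int)) ∈ pvLit := by decide
          cases h1 : (["hours", "open", "close", "when", "location", "address"].any (fun k => PySem.Str.isIn k msg)) with
          | true =>
            obtain ⟨k, hk, hkin⟩ := List.any_eq_true.mp h1
            rw [pv_min?_eq _ 0 (pv_mem_prios msg 0 k (g0 k hk) hkin)
              (pv_lower msg 0 [] (by decide) (by simp))]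
            rfl
          | false =>
            have h1' : ∀ k ∈ ["hours", "open", "close", "when", "location", "address"],
                PySem.Str.isIn k msg = false := fun k hk =>
              Bool.eq_false_iff.mpr (List.any_eq_false.mp h1 k hk)
            cases h2 : (["insurance", "billing", "payment", "cost", "price", "fee"].any (fun k => PySem.Str.isIn k msg)) with
            | true =>
              obtain ⟨k, hk, hkin⟩ := List.any_eq_true.mp h2
              rw [pv_min?_eq _ 1 (pv_mem_prios msg 1 k (g1 k hk) hkin)
                (pv_lower msg 1 ["hours", "open", "close", "when", "location", "address"]
                  (by decide) h1')]
              rfl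
            | false =>
              have h2' : ∀ k ∈ ["insurance", "billing", "payment", "cost", "price", "fee"],
                  PySem.Str.isIn k msg = false := fun k hk =>
                Bool.eq_false_iff.mpr (List.any_eq_false.mp h2 k hk)
              have h12 := pv_append_false h1' h2'
              cases h3 : (["book", "schedule", "appointment", "date", "time", "reschedule"].any (fun k => PySem.Str.isIn k msg)) with
              | true =>
                obtain ⟨k, hk, hkin⟩ := List.any_eq_true.mp h3
                rw [pv_min?_eq _ 2 (pv_mem_prios msg 2 k (g2 k hk) hkin)
                  (pv_lower msg 2 (["hours", "open", "close", "when", "location", "address"] ++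
                    ["insurance", "billing", "payment", "cost", "price", "fee"]) (by decide) h12)]
                rfl
              | false =>
                have h3' : ∀ k ∈ ["book", "schedule", "appointment", "date", "time", "reschedule"],
                    PySem.Str.isIn k msg = false := fun k hk =>
                  Bool.eq_false_iff.mpr (List.any_eq_false.mp h3 k hk)
                have h123 := pv_append_false h12 h3'
                cases h4 : (["cancel", "reschedule", "change", "modify"].any (fun k => PySem.Str.isIn k msg)) with
                | true =>
                  obtain ⟨k, hk, hkin⟩ := List.any_eq_true.mp h4
                  have hkL : (k, (3 : Int)) ∈ pvLit := by
                    simp only [List.mem_cons, List.not_mem_nil, or_false] at hk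
                    rcases hk with h|h|h|h <;> subst h
                    · decide
                    · -- "reschedule" belongs to group 2, whose `any` is false here: contradiction
                      rw [h3' "reschedule" (by simp)] at hkin
                      exact absurd hkin Bool.false_ne_true
                    · decide
                    · decide
                  rw [pv_min?_eq _ 3 (pv_mem_prios msg 3 k hkL hkin)
                    (pv_lower msg 3 ((["hours", "open", "close", "when", "location", "address"] ++
                      ["insurance", "billing", "payment", "cost", "price", "fee"]) ++
                      ["book", "schedule", "appointment", "date", "time", "reschedule"])
                      (by decide) h123)]
                  rfl
                | false =>
                  have h4' : ∀ k ∈ ["cancel", "reschedule", "change", "modify"],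
                      PySem.Str.isIn k msg = false := fun k hk =>
                    Bool.eq_false_iff.mpr (List.any_eq_false.mp h4 k hk)
                  have h1234 := pv_append_false h123 h4'
                  cases h5 : (["doctor", "physician", "specialist", "staff", "qualifications"].any (fun k => PySem.Str.isIn k msg)) with
                  | true =>
                    obtain ⟨k, hk, hkin⟩ := List.any_eq_true.mp h5
                    rw [pv_min?_eq _ 4 (pv_mem_prios msg 4 k (g4 k hk) hkin)
                      (pv_lower msg 4 (((["hours", "open", "close", "when", "location", "address"] ++
                        ["insurance", "billing", "payment", "cost", "price", "fee"]) ++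
                        ["book", "schedule", "appointment", "date", "time", "reschedule"]) ++
                        ["cancel", "reschedule", "change", "modify"]) (by decide) h1234)]
                    rfl
                  | false =>
                    have h5' : ∀ k ∈ ["doctor", "physician", "specialist", "staff", "qualifications"],
                        PySem.Str.isIn k msg = false := fun k hk =>
                      Bool.eq_false_iff.mpr (List.any_eq_false.mp h5 k hk)
                    have hall := pv_append_false h1234 h5'
                    have hnone : pvLit.filter (fun p => PySem.Str.isIn p.1 msg) = [] := by
                      rw [List.filter_eq_nil_iff]
                      intro p hp
                      exact pv_not_true (hall p.1
                        ((by decide : ∀ q ∈ pvLit, q.1 ∈ ((((["hours", "open", "close", "when",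
                          "location", "address"] ++ ["insurance", "billing", "payment", "cost",
                          "price", "fee"]) ++ ["book", "schedule", "appointment", "date", "time",
                          "reschedule"]) ++ ["cancel", "reschedule", "change", "modify"]) ++
                          ["doctor", "physician", "specialist", "staff", "qualifications"]))
                          p hp))
                    rw [hnone]
                    rfl
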